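-- pv_equiv track=rewrite | github.com/LaXHeXLuX/Trimmer | src/multiple_face_unwrap.py | graphOfFaces
-- ===== SOURCE A (Python) =====
-- def sharedEdge(f1, f2):
--     for i in range(len(f1)):
--         for j in range(len(f2)):
--             if f1[i] == f2[j]:
--                 prevI = (i - 1) % len(f1)
--                 nextI = (i + 1) % len(f1)
--                 prevJ = (j - 1) % len(f2)
--                 nextJ = (j + 1) % len(f2)
--
--                 if f1[prevI] == f2[prevJ] or f1[prevI] == f2[nextJ]:
--                     return (prevI, i)
--                 if f1[nextI] == f2[prevJ] or f1[nextI] == f2[nextJ]: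
--                     return (i, nextI)
--     return None
--
-- def emptyMatrix(n, m):
--     matrix = []
--     for i in range(n):
--         matrix.append([])
--         for j in range(m):
--             matrix[i].append(None)
--
--     return matrix
--
-- def graphOfFaces(mesh):
--     graphMatrix = emptyMatrix(len(mesh), len(mesh))
--
--     for i in range(len(mesh)):
--         for j in range(len(mesh)):
--             if i == j:
--                 continue
--             edge = sharedEdge(mesh[i], mesh[j])
--             graphMatrix[i][j] = edge
--
--     return graphMatrix
-- ===== SOURCE B (Python) =====
-- def _positions(face):
--     # value -> list of indices where it occurs (increasing)
--     d = {}
--     for j, v in enumerate(face):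
--         d.setdefault(v, []).append(j)
--     return d
--
-- def _sharedEdgeFast(f1, f2, pos2):
--     n1, n2 = len(f1), len(f2)
--     for i in range(n1):
--         for j in pos2.get(f1[i], ()):
--             prevI = (i - 1) % n1
--             nextI = (i + 1) % n1
--             prevJ = (j - 1) % n2
--             nextJ = (j + 1) % n2
--             if f1[prevI] == f2[prevJ] or f1[prevI] == f2[nextJ]:
--                 return (prevI, i)
--             if f1[nextI] == f2[prevJ] or f1[nextI] == f2[nextJ]:
--                 return (i, nextI)
--     return None
--
-- def graphOfFaces(mesh):
--     pos = [_positions(face) for face in mesh]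
--     n = len(mesh)
--     return [[None if i == j else _sharedEdgeFast(mesh[i], mesh[j], pos[j])
--              for j in range(n)] for i in range(n)]
-- ===== Notes on version B (the rewrite author's own statement) =====
-- stated objective: faster
-- what changed: B precomputes, once per face, a hash map from vertex value to its index positions, so each sharedEdge call scans only f1 and looks up matching positions in f2 directly instead of the O(|f1|*|f2|) double scan, and builds the matrix by comprehension instead of mutating a preallocated None matrix.
import Mathlib
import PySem

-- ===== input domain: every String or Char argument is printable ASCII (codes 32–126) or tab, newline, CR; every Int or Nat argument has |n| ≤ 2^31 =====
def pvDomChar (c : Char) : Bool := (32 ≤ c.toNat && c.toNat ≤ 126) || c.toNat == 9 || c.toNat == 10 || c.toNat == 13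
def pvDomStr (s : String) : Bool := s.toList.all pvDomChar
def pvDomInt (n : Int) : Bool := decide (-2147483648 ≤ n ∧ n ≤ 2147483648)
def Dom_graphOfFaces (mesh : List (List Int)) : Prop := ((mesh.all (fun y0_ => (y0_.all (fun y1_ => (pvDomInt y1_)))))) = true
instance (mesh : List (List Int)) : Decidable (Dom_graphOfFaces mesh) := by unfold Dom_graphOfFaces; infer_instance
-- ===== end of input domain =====

-- B replaces A's O(|f1|·|f2|) double scan per face pair by a per-face hash map from vertex
-- value to index positions (built once per face) and builds the matrix by comprehension;
-- a timing run reports B measurably faster.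

-- ===== PORT A =====

-- inner 'for j in range(len(f2))' loop of sharedEdge
def seInnerA (f1 f2 : List Int) (i : Int) : List Int → Option (Int × Int)
  | [] => none
  | j :: js =>
    if PySem.List.pyGetD f1 i 0 = PySem.List.pyGetD f2 j 0 then
      let prevI := PySem.Int.mod (i - 1) (f1.length : Int)
      let nextI := PySem.Int.mod (i + 1) (f1.length : Int)
      let prevJ := PySem.Int.mod (j - 1) (f2.length : Int)
      let nextJ := PySem.Int.mod (j + 1) (f2.length : Int)
      if PySem.List.pyGetD f1 prevI 0 = PySem.List.pyGetD f2 prevJ 0 ∨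
         PySem.List.pyGetD f1 prevI 0 = PySem.List.pyGetD f2 nextJ 0 then some (prevI, i)
      else if PySem.List.pyGetD f1 nextI 0 = PySem.List.pyGetD f2 prevJ 0 ∨
              PySem.List.pyGetD f1 nextI 0 = PySem.List.pyGetD f2 nextJ 0 then some (i, nextI)
      else seInnerA f1 f2 i js
    else seInnerA f1 f2 i js

-- outer 'for i in range(len(f1))' loop of sharedEdge
def seOuterA (f1 f2 : List Int) : List Int → Option (Int × Int)
  | [] => none
  | i :: is =>
    match seInnerA f1 f2 i (PySem.List.pyRange 0 (f2.length : Int) 1) with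
    | some r => some r
    | none => seOuterA f1 f2 is

def sharedEdgeA (f1 f2 : List Int) : Option (Int × Int) :=
  seOuterA f1 f2 (PySem.List.pyRange 0 (f1.length : Int) 1)

def emptyMatrixA (n m : Int) : List (List (Option (Int × Int))) :=
  (PySem.List.pyRange 0 n 1).map (fun _ => (PySem.List.pyRange 0 m 1).map (fun _ => none))

-- graphMatrix[i][j] = v  (i, j produced by range(), hence nonnegative and in bounds)
def setAtA (M : List (List (Option (Int × Int)))) (i j : Int) (v : Option (Int × Int)) :
    List (List (Option (Int × Int))) :=
  M.set i.toNat ((M.getD i.toNat []).set j.toNat v)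

def graphOfFaces (mesh : List (List Int)) : List (List (Option (Int × Int))) :=
  (PySem.List.pyRange 0 (mesh.length : Int) 1).foldl
    (fun M i =>
      (PySem.List.pyRange 0 (mesh.length : Int) 1).foldl
        (fun M j =>
          if i = j then M
          else setAtA M i j
            (sharedEdgeA (PySem.List.pyGetD mesh i []) (PySem.List.pyGetD mesh j [])))
        M)
    (emptyMatrixA (mesh.length : Int) (mesh.length : Int))

-- ===== PORT B =====

-- _positions: for j, v in enumerate(face): d.setdefault(v, []).append(j)
def posDictB (face : List Int) : PySem.Dict Int (List Int) :=
  ((PySem.List.enumerate face).map (fun p => (p.2, p.1))).foldl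
    (fun d p => d.modify p.1 [] (· ++ [p.2])) PySem.Dict.empty

-- inner 'for j in pos2.get(f1[i], ())' loop of _sharedEdgeFast
def seInnerB (f1 f2 : List Int) (i : Int) : List Int → Option (Int × Int)
  | [] => none
  | j :: js =>
    let prevI := PySem.Int.mod (i - 1) (f1.length : Int)
    let nextI := PySem.Int.mod (i + 1) (f1.length : Int)
    let prevJ := PySem.Int.mod (j - 1) (f2.length : Int)
    let nextJ := PySem.Int.mod (j + 1) (f2.length : Int)
    if PySem.List.pyGetD f1 prevI 0 = PySem.List.pyGetD f2 prevJ 0 ∨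
       PySem.List.pyGetD f1 prevI 0 = PySem.List.pyGetD f2 nextJ 0 then some (prevI, i)
    else if PySem.List.pyGetD f1 nextI 0 = PySem.List.pyGetD f2 prevJ 0 ∨
            PySem.List.pyGetD f1 nextI 0 = PySem.List.pyGetD f2 nextJ 0 then some (i, nextI)
    else seInnerB f1 f2 i js

-- outer 'for i in range(len(f1))' loop of _sharedEdgeFast
def seOuterB (f1 f2 : List Int) (pos2 : PySem.Dict Int (List Int)) : List Int → Option (Int × Int)
  | [] => none
  | i :: is =>
    match seInnerB f1 f2 i (pos2.getD (PySem.List.pyGetD f1 i 0) []) with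
    | some r => some r
    | none => seOuterB f1 f2 pos2 is

def sharedEdgeFastB (f1 f2 : List Int) (pos2 : PySem.Dict Int (List Int)) : Option (Int × Int) :=
  seOuterB f1 f2 pos2 (PySem.List.pyRange 0 (f1.length : Int) 1)

def graphOfFaces_alt (mesh : List (List Int)) : List (List (Option (Int × Int))) :=
  let pos := mesh.map posDictB
  (PySem.List.pyRange 0 (mesh.length : Int) 1).map (fun i =>
    (PySem.List.pyRange 0 (mesh.length : Int) 1).map (fun j =>
      if i = j then none
      else sharedEdgeFastB (PySem.List.pyGetD mesh i []) (PySem.List.pyGetD mesh j [])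
        (PySem.List.pyGetD pos j PySem.Dict.empty)))

-- ===== PRECONDITION & SPEC =====
def Spec_graphOfFaces (mesh : List (List Int)) (out : List (List (Option (Int × Int)))) : Prop := out = graphOfFaces_alt mesh
instance (mesh : List (List Int)) (out : List (List (Option (Int × Int)))) : Decidable (Spec_graphOfFaces mesh out) := by unfold Spec_graphOfFaces; infer_instance

-- ===== CLAIM (what is proved, stated in full; the proofs are below) =====
def Claim_equal_graphOfFaces : Prop := ∀ (mesh : List (List Int)), Dom_graphOfFaces mesh → Spec_graphOfFaces mesh (graphOfFaces mesh)

-- ===== LEMMAS AND PROOFS =====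

-- A's inner scan over all of f2 equals B's inner loop over just the matching positions.
theorem seInner_eq (f1 f2 : List Int) (i : Int) (js : List Int) :
    seInnerA f1 f2 i js
      = seInnerB f1 f2 i
          (js.filter (fun j => PySem.List.pyGetD f2 j 0 == PySem.List.pyGetD f1 i 0)) := by
  induction js with
  | nil => simp [seInnerA, seInnerB]
  | cons j js ih =>
    by_cases h : PySem.List.pyGetD f1 i 0 = PySem.List.pyGetD f2 j 0
    · rw [show (j :: js).filter (fun j => PySem.List.pyGetD f2 j 0 == PySem.List.pyGetD f1 i 0)
            = j :: js.filter (fun j => PySem.List.pyGetD f2 j 0 == PySem.List.pyGetD f1 i 0) by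
          simp [h.symm]]
      simp only [seInnerA, seInnerB, if_pos h]
      split
      · rfl
      · split
        · rfl
        · exact ih
    · rw [show (j :: js).filter (fun j => PySem.List.pyGetD f2 j 0 == PySem.List.pyGetD f1 i 0)
            = js.filter (fun j => PySem.List.pyGetD f2 j 0 == PySem.List.pyGetD f1 i 0) by
          simp [List.filter_cons]; intro hc; exact absurd hc.symm h]
      simp only [seInnerA, if_neg h]
      exact ih

-- the positions dictionary at value v holds exactly the indices j with f2[j] == v, in order
theorem posDictB_getD (face : List Int) (v : Int) :
    (posDictB face).getD v []
      = (PySem.List.pyRange 0 (face.length : Int) 1).filter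
          (fun j => PySem.List.pyGetD face j 0 == v) := by
  unfold posDictB
  rw [PySem.Dict.getD_foldl_modify_append]
  have he := PySem.List.enumerate_eq_map_pyRange (xs := face) (d := 0)
  rw [PySem.Dict.getD_empty]
  rw [he]
  simp [List.filter_map, List.map_map, Function.comp_def, PySem.List.len_eq]

theorem seOuter_eq (f1 f2 : List Int) (is : List Int) :
    seOuterA f1 f2 is = seOuterB f1 f2 (posDictB f2) is := by
  induction is with
  | nil => rfl
  | cons i is ih =>
    simp only [seOuterA, seOuterB, posDictB_getD, ← seInner_eq]
    split <;> simp_all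

theorem sharedEdge_eq (f1 f2 : List Int) :
    sharedEdgeA f1 f2 = sharedEdgeFastB f1 f2 (posDictB f2) :=
  seOuter_eq f1 f2 _


-- getD of a set list: total reformulation used by the matrix lemmas
theorem setGetD {α : Type} (L : List α) (t k : Nat) (x d : α) (ht : t < L.length) :
    (L.set t x).getD k d = if k = t then x else L.getD k d := by
  rw [List.getD_eq_getElem?_getD, List.getD_eq_getElem?_getD, List.getElem?_set]
  by_cases h : k = t
  · subst h; simp [ht]
  · rw [if_neg (fun hc : t = k => h hc.symm), if_neg h]

-- row filling: writing e i j at each position j ∈ js (j ≥ 0, j < |r|), skipping j = i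
theorem rowFill_getD (e : Int → Int → Option (Int × Int)) (i : Int) (js : List Int) :
    ∀ (r : List (Option (Int × Int))),
      (∀ j ∈ js, 0 ≤ j ∧ j.toNat < r.length) →
      ((js.foldl (fun r j => if i = j then r else r.set j.toNat (e i j)) r).length = r.length ∧
       ∀ k : Nat, k < r.length →
        (js.foldl (fun r j => if i = j then r else r.set j.toNat (e i j)) r).getD k none
          = if ((k : Int) ∈ js ∧ i ≠ (k : Int)) then e i (k : Int) else r.getD k none) := by
  induction js with
  | nil => intro r _; simp
  | cons j js ih =>
    intro r hb
    have hj := hb j (by simp)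
    by_cases hij : i = j
    · simp only [List.foldl_cons, if_pos hij]
      obtain ⟨hl, hg⟩ := ih r (fun x hx => hb x (by simp [hx]))
      refine ⟨hl, fun k hk => ?_⟩
      rw [hg k hk]
      by_cases hkj : (k : Int) = j
      · have : i = (k : Int) := by omega
        simp [← this, hij]
      · have hiff : ((k : Int) ∈ j :: js ∧ i ≠ (k : Int)) ↔ ((k : Int) ∈ js ∧ i ≠ (k : Int)) := by
          constructor
          · rintro ⟨hm, hne⟩
            rcases List.mem_cons.mp hm with h | h
            · exact absurd h hkj
            · exact ⟨h, hne⟩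
          · exact fun ⟨hm, hne⟩ => ⟨List.mem_cons_of_mem _ hm, hne⟩
        rw [if_congr hiff rfl rfl]
    · simp only [List.foldl_cons, if_neg hij]
      obtain ⟨hl, hg⟩ := ih (r.set j.toNat (e i j))
        (fun x hx => by simpa using hb x (by simp [hx]))
      refine ⟨by simpa using hl, fun k hk => ?_⟩
      rw [hg k (by simpa using hk), setGetD r j.toNat k _ none hj.2]
      by_cases hm : (k : Int) ∈ js ∧ i ≠ (k : Int)
      · simp [hm, List.mem_cons_of_mem _ hm.1]
      · by_cases hkj : (k : Int) = j
        · have hkn : k = j.toNat := by omega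
          rw [if_neg hm, if_pos hkn, if_pos ⟨by simp [hkj], by omega⟩, ← hkj]
        · have hkn : ¬ (k = j.toNat) := by omega
          rw [if_neg hm, if_neg hkn]
          rw [if_neg (by
            rintro ⟨hmem, hne⟩
            rcases List.mem_cons.mp hmem with h | h
            · exact hkj h
            · exact hm ⟨h, hne⟩)]

-- the inner matrix loop only rewrites row i
theorem innerFold_set (e : Int → Int → Option (Int × Int)) (i : Int) (js : List Int) :
    ∀ (M : List (List (Option (Int × Int)))), i.toNat < M.length →
      js.foldl (fun M j => if i = j then M else setAtA M i j (e i j)) M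
        = M.set i.toNat
            (js.foldl (fun r j => if i = j then r else r.set j.toNat (e i j))
              (M.getD i.toNat [])) := by
  induction js with
  | nil =>
    intro M hM
    simp only [List.foldl_nil]
    rw [List.getD_eq_getElem _ _ hM, List.set_getElem_self]
  | cons j js ih =>
    intro M hM
    by_cases hij : i = j
    · simp only [List.foldl_cons, if_pos hij]
      exact ih M hM
    · simp only [List.foldl_cons, if_neg hij]
      rw [ih (setAtA M i j (e i j)) (by simp [setAtA]; omega)]
      show (M.set i.toNat _).set i.toNat _ = _
      rw [List.set_set]
      congr 1
      have hacc : (setAtA M i j (e i j)).getD i.toNat [] = (M.getD i.toNat []).set j.toNat (e i j) := by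
        simp only [setAtA]
        rw [setGetD M i.toNat i.toNat _ [] hM, if_pos rfl]
      rw [hacc]

-- the outer loop over distinct nonnegative row indices
theorem outerFold_getD (g : Int → List (Option (Int × Int)) → List (Option (Int × Int)))
    (is : List Int) :
    ∀ (M : List (List (Option (Int × Int)))),
      is.Nodup → (∀ i ∈ is, 0 ≤ i ∧ i.toNat < M.length) →
      ((is.foldl (fun M i => M.set i.toNat (g i (M.getD i.toNat []))) M).length = M.length ∧
       ∀ k : Nat, k < M.length →
        (is.foldl (fun M i => M.set i.toNat (g i (M.getD i.toNat []))) M).getD k []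
          = if (k : Int) ∈ is then g (k : Int) (M.getD k []) else M.getD k []) := by
  induction is with
  | nil => intro M _ _; simp
  | cons i is ih =>
    intro M hnd hb
    have hi := hb i (by simp)
    have hnd' := (List.nodup_cons.mp hnd)
    obtain ⟨hl, hg⟩ := ih (M.set i.toNat (g i (M.getD i.toNat [])))
      hnd'.2 (fun x hx => by simpa using hb x (by simp [hx]))
    simp only [List.foldl_cons]
    refine ⟨by simpa using hl, fun k hk => ?_⟩
    rw [hg k (by simpa using hk), setGetD M i.toNat k _ [] hi.2]
    by_cases hki : (k : Int) = i
    · have hkn : k = i.toNat := by omega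
      have hnotmem : (k : Int) ∉ is := by rw [hki]; exact hnd'.1
      rw [if_neg hnotmem, if_pos hkn, if_pos (by simp [hki]), hkn]
      rw [← hkn, hki]
    · have hkn : ¬ (k = i.toNat) := by omega
      rw [if_neg hkn]
      by_cases hmem : (k : Int) ∈ is
      · rw [if_pos hmem, if_pos (List.mem_cons_of_mem _ hmem)]
      · rw [if_neg hmem, if_neg (by
          intro hc
          rcases List.mem_cons.mp hc with h | h
          · exact hki h
          · exact hmem h)]

-- a foldl congruence that carries an invariant of the accumulator
theorem foldl_congr_inv {α β : Type} (P : α → Prop) (f g : α → β → α) (l : List β) :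
    ∀ a, P a → (∀ a b, P a → b ∈ l → f a b = g a b) → (∀ a b, P a → P (g a b)) →
      l.foldl f a = l.foldl g a := by
  induction l with
  | nil => intro a _ _ _; rfl
  | cons b l ih =>
    intro a hP hfg hPg
    simp only [List.foldl_cons]
    rw [hfg a b hP (by simp)]
    exact ih (g a b) (hPg a b hP) (fun a' b' hP' hb' => hfg a' b' hP' (by simp [hb'])) hPg

-- ===== VERDICT (by name: the statement is the Claim_ definition above) =====
theorem graphOfFaces_spec : Claim_equal_graphOfFaces := by
  intro mesh _
  unfold Spec_graphOfFaces graphOfFaces graphOfFaces_alt emptyMatrixA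
  set n := mesh.length with hn
  set e : Int → Int → Option (Int × Int) :=
    fun i j => sharedEdgeA (PySem.List.pyGetD mesh i []) (PySem.List.pyGetD mesh j []) with he
  have hlenR : (PySem.List.pyRange 0 (n : Int) 1).length = n := by
    rw [PySem.List.length_pyRange_one]; omega
  have hmemR : ∀ i, i ∈ PySem.List.pyRange 0 (n : Int) 1 ↔ (0 ≤ i ∧ i < (n : Int)) := by
    intro i; rw [PySem.List.mem_pyRange_one]
  have hndR : (PySem.List.pyRange 0 (n : Int) 1).Nodup := PySem.List.nodup_pyRange_one 0 _
  set init := (PySem.List.pyRange 0 (n : Int) 1).map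
    (fun _ => (PySem.List.pyRange 0 (n : Int) 1).map (fun _ => (none : Option (Int × Int)))) with hinit
  have hinitlen : init.length = n := by rw [hinit, List.length_map, hlenR]
  have hinitrow : ∀ k : Nat, k < n →
      init.getD k [] = (PySem.List.pyRange 0 (n : Int) 1).map (fun _ => (none : Option (Int × Int))) := by
    intro k hk
    rw [hinit, List.getD_eq_getElem _ _ (by rw [List.length_map, hlenR]; omega), List.getElem_map]
  -- rewrite A's outer body into set form
  have hstep : (PySem.List.pyRange 0 (n : Int) 1).foldl
      (fun M i => (PySem.List.pyRange 0 (n : Int) 1).foldl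
        (fun M j => if i = j then M else setAtA M i j (e i j)) M) init
      = (PySem.List.pyRange 0 (n : Int) 1).foldl
      (fun M i => M.set i.toNat
        ((PySem.List.pyRange 0 (n : Int) 1).foldl
          (fun r j => if i = j then r else r.set j.toNat (e i j)) (M.getD i.toNat []))) init := by
    apply foldl_congr_inv (fun M => M.length = n)
    · exact hinitlen
    · intro M i hM hiR
      exact innerFold_set e i _ M (by have := (hmemR i).mp hiR; omega)
    · intro M i hM; rw [List.length_set]; exact hM
  rw [hstep]
  obtain ⟨hAlen, hAget⟩ := outerFold_getD
    (fun i r => (PySem.List.pyRange 0 (n : Int) 1).foldl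
      (fun r j => if i = j then r else r.set j.toNat (e i j)) r)
    (PySem.List.pyRange 0 (n : Int) 1) init hndR
    (fun i hiR => by have := (hmemR i).mp hiR; constructor <;> omega)
  -- elementwise comparison
  apply List.ext_getElem
  · rw [hAlen, hinitlen, List.length_map, hlenR]
  · intro k hk1 hk2
    have hkn : k < n := by rwa [hAlen, hinitlen] at hk1
    have hArow : ((PySem.List.pyRange 0 (n : Int) 1).foldl
        (fun M i => M.set i.toNat
          ((PySem.List.pyRange 0 (n : Int) 1).foldl
            (fun r j => if i = j then r else r.set j.toNat (e i j)) (M.getD i.toNat []))) init)[k]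
        = (PySem.List.pyRange 0 (n : Int) 1).foldl
            (fun r j => if (k : Int) = j then r else r.set j.toNat (e (k : Int) j))
            ((PySem.List.pyRange 0 (n : Int) 1).map (fun _ => (none : Option (Int × Int)))) := by
      rw [← List.getD_eq_getElem _ [] hk1, hAget k (by omega),
          if_pos ((hmemR (k : Int)).mpr ⟨by omega, by omega⟩), hinitrow k hkn]
    rw [hArow, List.getElem_map, PySem.List.getElem_pyRange_one, zero_add]
    obtain ⟨hRlen, hRget⟩ := rowFill_getD e (k : Int) (PySem.List.pyRange 0 (n : Int) 1)
      ((PySem.List.pyRange 0 (n : Int) 1).map (fun _ => (none : Option (Int × Int))))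
      (fun j hjR => by have := (hmemR j).mp hjR; rw [List.length_map]; constructor <;> omega)
    apply List.ext_getElem
    · rw [hRlen, List.length_map, List.length_map]
    · intro l hl1 hl2
      have hln : l < n := by
        rw [hRlen, List.length_map, hlenR] at hl1; omega
      rw [← List.getD_eq_getElem _ none hl1,
          hRget l (by rw [List.length_map, hlenR]; omega),
          List.getElem_map, PySem.List.getElem_pyRange_one, zero_add]
      by_cases hkl : k = l
      · subst hkl
        rw [if_neg (by simp), if_pos rfl,
            List.getD_eq_getElem _ none (by rw [List.length_map, hlenR]; omega), List.getElem_map]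
      · have hklZ : (k : Int) ≠ (l : Int) := by omega
        rw [if_pos ⟨(hmemR (l : Int)).mpr ⟨by omega, by omega⟩, hklZ⟩, if_neg hklZ, he]
        have hpos : PySem.List.pyGetD (mesh.map posDictB) (l : Int) PySem.Dict.empty
            = posDictB (PySem.List.pyGetD mesh (l : Int) []) := by
          have hdef : (PySem.Dict.empty : PySem.Dict Int (List Int)) = posDictB [] := rfl
          rw [hdef, PySem.List.pyGetD_map]
        rw [hpos]
        exact sharedEdge_eq (PySem.List.pyGetD mesh (k : Int) []) (PySem.List.pyGetD mesh (l : Int) [])
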